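-- pv_equiv track=rewrite | github.com/Metro19/AdventOfCode2023 | Day 4/day4star2.py | score_one_card
-- ===== SOURCE A (Python) =====
-- def score_one_card(number_to_score: int, next_cards: list[int], DP: list[int]) -> int:
--     # check if number has already been calculated
--     if DP[number_to_score] != -1:
--         return DP[number_to_score]
--
--     # None more to return
--     if next_cards[number_to_score] == 0:
--         return 1
--
--     # calculate number
--     total = 1
--     for i in range(number_to_score + 1, next_cards[number_to_score] + number_to_score + 1):
--         res = score_one_card(i % len(next_cards), next_cards, DP)
--         DP[i % len(next_cards)] = res
--         total += res
--
--     DP[number_to_score] = total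
--     return total
-- ===== SOURCE B (Python) =====
-- def score_one_card(number_to_score: int, next_cards: list[int], DP: list[int]) -> int:
--     # memo hit: already scored
--     if DP[number_to_score] != -1:
--         return DP[number_to_score]
--     n = len(next_cards)
--     # bottom-up fixpoint: a value table over all cards, filled whenever every card a
--     # card wins (taken modulo n, as A does) is already valued; at most n sweeps.
--     val = [DP[j] if DP[j] != -1 else None for j in range(n)]
--     for _ in range(n):
--         changed = False
--         for j in reversed(range(n)):
--             if val[j] is None:
--                 k = next_cards[j]
--                 if all(val[(j + 1 + t) % n] is not None for t in range(k)):
--                     val[j] = 1 + sum(val[(j + 1 + t) % n] for t in range(k))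
--                     changed = True
--         if not changed:
--             break
--     return val[number_to_score]
-- ===== Notes on version B (the rewrite author's own statement) =====
-- stated objective: alternative
-- what changed: A's top-down memoized recursion over won cards is replaced by a bottom-up fixpoint computation: a value table over all n cards filled in repeated reverse sweeps (a card is valued once every card it wins, taken modulo n exactly as A takes it, is valued), stopping when a sweep changes nothing.
-- outside the precondition, e.g. on score_one_card(-1, [0, -1, 0], [-1, -1]): A returns 1, B raises IndexError; on score_one_card(-4, [10, -1, 2, 2], [2, -1, 0, -1, 2]): A returns 16, B returns 2
import Mathlib
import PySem

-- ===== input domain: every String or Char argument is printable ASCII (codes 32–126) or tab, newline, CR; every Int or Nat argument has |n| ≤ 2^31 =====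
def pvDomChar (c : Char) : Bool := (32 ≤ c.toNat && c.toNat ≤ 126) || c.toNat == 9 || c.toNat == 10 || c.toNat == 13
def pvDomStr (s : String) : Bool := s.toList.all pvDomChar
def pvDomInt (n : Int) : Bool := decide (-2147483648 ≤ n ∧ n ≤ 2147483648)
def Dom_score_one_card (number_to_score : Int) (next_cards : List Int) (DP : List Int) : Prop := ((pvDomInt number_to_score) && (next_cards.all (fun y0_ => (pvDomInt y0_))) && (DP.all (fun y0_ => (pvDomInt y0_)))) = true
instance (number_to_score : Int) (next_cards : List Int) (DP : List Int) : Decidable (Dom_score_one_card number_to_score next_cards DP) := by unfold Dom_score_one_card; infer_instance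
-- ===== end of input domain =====

-- B replaces A's top-down memoized recursion by a bottom-up fixpoint sweep over a value
-- table (at most n passes, each filling every card whose won cards are already valued);
-- Python A mutates DP in place — the equivalence claimed here is about the RETURN value
-- only (the port threads the mutated list functionally).

-- ===== PORT A =====
-- fuel-indexed transliteration of A's recursion; fuel `next_cards.length + 1` suffices on
-- every input admitted by Pre_ (proved below); the fuel-out / IndexError branches return a
-- junk value and are unreachable under Pre_.
def scoreAuxA : Nat → Int → List Int → List Int → Int × List Int
  | 0, _, _, DP => (0, DP)
  | fuel+1, number_to_score, next_cards, DP =>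
    match PySem.List.pyGet? DP number_to_score with
    | none => (0, DP)                               -- IndexError in Python
    | some d =>
      if d ≠ -1 then (d, DP)
      else
        match PySem.List.pyGet? next_cards number_to_score with
        | none => (0, DP)                           -- IndexError in Python
        | some k =>
          if k = 0 then (1, DP)
          else
            let st := (PySem.List.pyRange (number_to_score + 1) (k + number_to_score + 1) 1).foldl
              (fun (st : Int × List Int) i =>
                let idx := PySem.Int.mod i ((next_cards.length : Int))
                let r := scoreAuxA fuel idx next_cards st.2
                (st.1 + r.1, PySem.List.pySetD r.2 idx r.1))
              (1, DP)
            (st.1, PySem.List.pySetD st.2 number_to_score st.1)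

def score_one_card (number_to_score : Int) (next_cards : List Int) (DP : List Int) : Int :=
  (scoreAuxA (next_cards.length + 1) number_to_score next_cards DP).1

-- ===== PORT B =====
-- helpers transliterating Source B's generator expressions:
-- `all(val[(j+1+t) % n] is not None for t in range(k))` — short-circuiting scan
def allKnown (v : List (Option Int)) (n j : Nat) : Nat → Nat → Bool
  | _, 0 => true
  | t, rem+1 =>
    if (v.getD ((j + 1 + t) % n) none).isSome then allKnown v n j (t+1) rem else false

-- the body of Source B's inner loop over cards j (state = the value table and the changed flag)
def bodyB (nc : List Int) (st : List (Option Int) × Bool) (j : Nat) : List (Option Int) × Bool :=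
  match st.1.getD j none with
  | some _ => st
  | none =>
    let k := (PySem.List.pyGetD nc (j : Int) 0).toNat
    if allKnown st.1 nc.length j 0 k
    then (st.1.set j (some (1 + ((List.range k).map
            (fun t => (st.1.getD ((j + 1 + t) % nc.length) none).getD 0)).sum)), true)
    else st

-- one sweep `for j in reversed(range(n)): …`, returning (new table, changed)
def passB (nc : List Int) (v : List (Option Int)) : List (Option Int) × Bool :=
  ((List.range nc.length).reverse).foldl (bodyB nc) (v, false)

-- `for _ in range(n): … ; if not changed: break`
def roundsB (nc : List Int) (v : List (Option Int)) : Nat → List (Option Int)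
  | 0 => v
  | r+1 => let p := passB nc v; if p.2 then roundsB nc p.1 r else p.1

def score_one_card_alt (number_to_score : Int) (next_cards : List Int) (DP : List Int) : Int :=
  match PySem.List.pyGet? DP number_to_score with
  | none => 0                                       -- IndexError in Python
  | some d =>
    if d ≠ -1 then d
    else
      let n := next_cards.length
      -- `val = [DP[j] if DP[j] != -1 else None for j in range(n)]`: under Pre_ the memo
      -- table covers the card list, so pyGetD's default is never read
      let val0 : List (Option Int) := (List.range n).map (fun (j : Nat) =>
        let dj := PySem.List.pyGetD DP (j : Int) 0
        if dj ≠ -1 then some dj else none)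
      let valF := roundsB next_cards val0 n
      match PySem.List.pyGet? valF number_to_score with
      | some (some v) => v
      | _ => 0           -- `val[number_to_score]` is None (Python returns a non-int) or IndexError

-- ===== PRECONDITION & SPEC =====
-- the n-step marking of the card-dependency graph: a card is marked terminating when it is
-- memoized or all cards it wins (taken modulo n, as both programs do; capped at n, which
-- changes nothing since the check only depends on the SET of won cards) are already marked
def kidsT (nc : List Int) (j : Nat) : List Nat :=
  (List.range (min (nc.getD j 0).toNat nc.length)).map (fun t => (j + 1 + t) % nc.length)

def stepT (nc DP : List Int) (m : List Bool) : List Bool :=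
  (List.range nc.length).map (fun j =>
    if DP.getD j 0 ≠ -1 then true else (kidsT nc j).all (fun c => m.getD c false))

def Tvec (nc DP : List Int) : Nat → List Bool
  | 0 => List.replicate nc.length false
  | k+1 => stepT nc DP (Tvec nc DP k)

def termN (nc DP : List Int) (k j : Nat) : Bool := (Tvec nc DP k).getD j false

-- Pre_ admits: a memo hit (any valid index), or an in-range scored card whose
-- card-dependency graph is well-founded below it — exactly where A's recursion bottoms out
-- instead of recursing forever (RecursionError) — with the natural-domain requirement that
-- the memo table covers the card list (a negative scored index additionally needs equal
-- lengths, since A wraps it in both lists). It excludes memo tables of mismatched length on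
-- which A still returns: there A's reads mix wraparound over two different lengths
-- (malformed input no maintainer would specify; B may raise or differ there).
def Pre_score_one_card (number_to_score : Int) (next_cards : List Int) (DP : List Int) : Prop :=
  (PySem.List.pyGet? DP number_to_score ≠ none ∧
   PySem.List.pyGet? DP number_to_score ≠ some (-1)) ∨
  (0 ≤ number_to_score ∧ number_to_score < (next_cards.length : Int) ∧
   next_cards.length ≤ DP.length ∧
   termN next_cards DP next_cards.length number_to_score.toNat = true) ∨
  (number_to_score < 0 ∧ -(next_cards.length : Int) ≤ number_to_score ∧
   DP.length = next_cards.length ∧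
   termN next_cards DP next_cards.length (number_to_score + next_cards.length).toNat = true)

instance (number_to_score : Int) (next_cards : List Int) (DP : List Int) : Decidable (Pre_score_one_card number_to_score next_cards DP) := by
  unfold Pre_score_one_card; infer_instance

def pvWitness_score_one_card : Int × List Int × List Int := (0, [1, 1, 0], [-1, -1, -1])

def Spec_score_one_card (number_to_score : Int) (next_cards : List Int) (DP : List Int) (out : Int) : Prop := out = score_one_card_alt number_to_score next_cards DP
instance (number_to_score : Int) (next_cards : List Int) (DP : List Int) (out : Int) : Decidable (Spec_score_one_card number_to_score next_cards DP out) := by unfold Spec_score_one_card; infer_instance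

-- ===== CLAIM (what is proved, stated in full; the proofs are below) =====
def Claim_equal_score_one_card : Prop := ∀ (number_to_score : Int) (next_cards : List Int) (DP : List Int), Dom_score_one_card number_to_score next_cards DP → Pre_score_one_card number_to_score next_cards DP → Spec_score_one_card number_to_score next_cards DP (score_one_card number_to_score next_cards DP)

-- ===== LEMMAS AND PROOFS =====

-- the full (uncapped) multiset of cards won by card j, as both programs enumerate it
def kidsOf (nc : List Int) (j : Nat) : List Nat :=
  (List.range (nc.getD j 0).toNat).map (fun t => (j + 1 + t) % nc.length)

lemma kid_lt {nc : List Int} {j : Nat} (hn : 0 < nc.length) :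
    ∀ c ∈ kidsOf nc j, c < nc.length := by
  intro c hc
  simp only [kidsOf, List.mem_map, List.mem_range] at hc
  obtain ⟨t, _, rfl⟩ := hc
  exact Nat.mod_lt _ hn

lemma kidT_lt {nc : List Int} {j : Nat} (hn : 0 < nc.length) :
    ∀ c ∈ kidsT nc j, c < nc.length := by
  intro c hc
  simp only [kidsT, List.mem_map, List.mem_range] at hc
  obtain ⟨t, _, rfl⟩ := hc
  exact Nat.mod_lt _ hn

lemma kidsT_subset {nc : List Int} {j : Nat} : kidsT nc j ⊆ kidsOf nc j := by
  unfold kidsT kidsOf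
  exact List.map_subset _ (List.range_subset.2 (Nat.min_le_left _ _))

lemma mem_kidsT_of_mem_kidsOf {nc : List Int} {j c : Nat} (hn : 0 < nc.length)
    (hc : c ∈ kidsOf nc j) : c ∈ kidsT nc j := by
  simp only [kidsOf, List.mem_map, List.mem_range] at hc
  obtain ⟨t, ht, rfl⟩ := hc
  simp only [kidsT, List.mem_map, List.mem_range]
  by_cases h : (nc.getD j 0).toNat ≤ nc.length
  · exact ⟨t, by omega, rfl⟩
  · refine ⟨t % nc.length, by rw [Nat.min_eq_right (by omega)]; exact Nat.mod_lt _ hn, ?_⟩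
    rw [Nat.add_mod_mod]

-- termN basics
lemma length_Tvec (nc DP : List Int) (k : Nat) : (Tvec nc DP k).length = nc.length := by
  cases k with
  | zero => simp [Tvec]
  | succ k => simp [Tvec, stepT]

lemma termN_zero (nc DP : List Int) (j : Nat) : termN nc DP 0 j = false := by
  unfold termN Tvec
  rcases Nat.lt_or_ge j nc.length with h | h
  · rw [List.getD_eq_getElem _ _ (by simpa using h)]; simp
  · rw [List.getD_eq_default _ _ (by simpa using h)]

lemma termN_lt {nc DP : List Int} {k j : Nat} (h : termN nc DP k j = true) : j < nc.length := by
  by_contra hj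
  rw [termN, List.getD_eq_default _ _ (by rw [length_Tvec]; omega)] at h
  exact Bool.false_ne_true h

lemma termN_succ (nc DP : List Int) (k : Nat) {j : Nat} (hj : j < nc.length) :
    termN nc DP (k+1) j =
      (if DP.getD j 0 ≠ -1 then true else (kidsT nc j).all (fun c => termN nc DP k c)) := by
  unfold termN
  rw [show Tvec nc DP (k+1) = stepT nc DP (Tvec nc DP k) from rfl, stepT,
    PySem.List.getD_map_range _ _ _ _ hj]

lemma termN_mono {nc DP : List Int} : ∀ {k k' j}, termN nc DP k j = true → k ≤ k' →
    termN nc DP k' j = true := by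
  intro k
  induction k with
  | zero => intro k' j h _; rw [termN_zero] at h; exact absurd h (by simp)
  | succ k ih =>
    intro k' j h hk
    have hj := termN_lt h
    obtain ⟨k'', rfl⟩ : ∃ m, k' = m + 1 := ⟨k' - 1, by omega⟩
    rw [termN_succ nc DP k hj] at h
    rw [termN_succ nc DP k'' hj]
    split_ifs with hd
    · rfl
    · rw [if_neg hd] at h
      exact List.all_eq_true.2 fun c hc => ih (List.all_eq_true.1 h c hc) (by omega)

-- stabilisation of the marking after nc.length steps
def allStab (nc DP : List Int) (k : Nat) : Prop :=
  ∀ j, j < nc.length → termN nc DP k j = termN nc DP (k+1) j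

lemma allStab_succ {nc DP : List Int} {k : Nat} (h : allStab nc DP k) : allStab nc DP (k+1) := by
  intro j hj
  rw [termN_succ nc DP k hj, termN_succ nc DP (k+1) hj]
  split_ifs with hd
  · rfl
  · apply Bool.eq_iff_iff.mpr
    simp only [List.all_eq_true]
    constructor <;> intro hall c hc
    · rw [← h c (kidT_lt (by omega) c hc)]; exact hall c hc
    · rw [h c (kidT_lt (by omega) c hc)]; exact hall c hc

lemma allStab_ge {nc DP : List Int} {k m : Nat} (h : allStab nc DP k) (hm : k ≤ m) :
    allStab nc DP m := by
  induction m with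
  | zero => exact (by omega : k = 0) ▸ h
  | succ m ih =>
    rcases Nat.lt_or_ge k (m+1) with h' | h'
    · exact allStab_succ (ih (by omega))
    · have : k = m + 1 := by omega
      subst this; exact h

lemma stab_eq {nc DP : List Int} {k : Nat} (h : allStab nc DP k) :
    ∀ m, k ≤ m → ∀ j, j < nc.length → termN nc DP m j = termN nc DP k j := by
  intro m
  induction m with
  | zero =>
    intro hm j hj
    rw [(by omega : k = 0)]
  | succ m ih =>
    intro hm j hj
    rcases Nat.lt_or_ge k (m+1) with h' | h'
    · rw [← allStab_ge h (by omega) j hj]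
      exact ih (by omega) j hj
    · rw [(by omega : k = m + 1)]

def Sset (nc DP : List Int) (k : Nat) : Finset Nat :=
  (Finset.range nc.length).filter (fun j => termN nc DP k j = true)

lemma Sset_ssub {nc DP : List Int} {k : Nat} (h : ¬ allStab nc DP k) :
    Sset nc DP k ⊂ Sset nc DP (k+1) := by
  unfold allStab at h
  push Not at h
  obtain ⟨j, hj, hne⟩ := h
  constructor
  · intro x hx
    simp only [Sset, Finset.mem_filter, Finset.mem_range] at hx ⊢
    exact ⟨hx.1, termN_mono hx.2 (by omega)⟩
  · intro hsub
    cases h1 : termN nc DP k j with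
    | true => exact hne (by rw [h1, termN_mono h1 (by omega)])
    | false =>
      cases h2 : termN nc DP (k+1) j with
      | false => exact hne (by rw [h1, h2])
      | true =>
        have : j ∈ Sset nc DP k := hsub (by
          simp only [Sset, Finset.mem_filter, Finset.mem_range]; exact ⟨hj, h2⟩)
        simp only [Sset, Finset.mem_filter] at this
        rw [this.2] at h1
        exact absurd h1 (by simp)

lemma exists_allStab (nc DP : List Int) : ∃ k, k ≤ nc.length ∧ allStab nc DP k := by
  by_contra hcon
  push Not at hcon
  have grow : ∀ k, k ≤ nc.length + 1 → k ≤ (Sset nc DP k).card := by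
    intro k
    induction k with
    | zero => intro _; omega
    | succ k ih =>
      intro hk
      have h1 := ih (by omega)
      have h2 := Finset.card_lt_card (Sset_ssub (hcon k (by omega)))
      omega
  have h1 := grow (nc.length + 1) le_rfl
  have h2 : (Sset nc DP (nc.length + 1)).card ≤ nc.length := by
    calc (Sset nc DP (nc.length + 1)).card ≤ (Finset.range nc.length).card :=
          Finset.card_le_card (Finset.filter_subset _ _)
      _ = nc.length := Finset.card_range _
  omega

lemma termN_to_n {nc DP : List Int} {k j : Nat} (h : termN nc DP k j = true) :
    termN nc DP nc.length j = true := by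
  have hj := termN_lt h
  obtain ⟨k0, hk0, hstab⟩ := exists_allStab nc DP
  rcases Nat.lt_or_ge nc.length k with hlt | hle
  swap
  · exact termN_mono h hle
  · rcases Nat.lt_or_ge k k0 with h1 | h1
    swap
    · rw [stab_eq hstab k h1 j hj] at h
      exact termN_mono h hk0
    · exact termN_mono h (by omega)

lemma termN_kids {nc DP : List Int} {k j : Nat} (hj : j < nc.length)
    (hd : DP.getD j 0 = -1) (h : termN nc DP (k+1) j = true) :
    ∀ c ∈ kidsOf nc j, termN nc DP k c = true := by
  intro c hc
  rw [termN_succ nc DP k hj, if_neg (not_not_intro hd)] at h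
  exact List.all_eq_true.1 h c (mem_kidsT_of_mem_kidsOf (by omega) hc)

-- the specification value: A's recursion read off the ORIGINAL DP, fuel-indexed
def fS (nc DP : List Int) : Nat → Nat → Int
  | 0, _ => 0
  | fu+1, j =>
    if DP.getD j 0 ≠ -1 then DP.getD j 0
    else 1 + ((kidsOf nc j).map (fun c => fS nc DP fu c)).sum

lemma fS_stable {nc DP : List Int} : ∀ {k} {j f1 f2}, termN nc DP k j = true →
    k ≤ f1 → k ≤ f2 → fS nc DP f1 j = fS nc DP f2 j := by
  intro k
  induction k with
  | zero => intro j f1 f2 h _ _; rw [termN_zero] at h; exact absurd h (by simp)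
  | succ k ih =>
    intro j f1 f2 h h1 h2
    have hj := termN_lt h
    obtain ⟨a, rfl⟩ : ∃ m, f1 = m + 1 := ⟨f1 - 1, by omega⟩
    obtain ⟨b, rfl⟩ : ∃ m, f2 = m + 1 := ⟨f2 - 1, by omega⟩
    show (if DP.getD j 0 ≠ -1 then DP.getD j 0
      else 1 + ((kidsOf nc j).map (fun c => fS nc DP a c)).sum) =
      (if DP.getD j 0 ≠ -1 then DP.getD j 0
      else 1 + ((kidsOf nc j).map (fun c => fS nc DP b c)).sum)
    split_ifs with hd
    · rfl
    · rw [not_not] at hd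
      have hkid := termN_kids hj hd h
      congr 1
      exact congrArg List.sum (List.map_congr_left fun c hc =>
        ih (hkid c hc) (by omega) (by omega))

def Fv (nc DP : List Int) (j : Nat) : Int := fS nc DP (nc.length + 1) j

lemma Fv_memo {nc DP : List Int} {j : Nat} (h : DP.getD j 0 ≠ -1) :
    Fv nc DP j = DP.getD j 0 := by
  unfold Fv fS
  rw [if_pos h]

lemma termN_of_kids {nc DP : List Int} {k j : Nat} (hj : j < nc.length)
    (h : ∀ c ∈ kidsOf nc j, termN nc DP k c = true) :
    termN nc DP (k+1) j = true := by
  rw [termN_succ nc DP k hj]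
  split_ifs with hd
  · rfl
  · exact List.all_eq_true.2 (fun c hc => h c (kidsT_subset hc))

lemma Fv_unfold {nc DP : List Int} {k j : Nat} (hj : j < nc.length)
    (hd : DP.getD j 0 = -1) (hk : termN nc DP k j = true) :
    Fv nc DP j = 1 + ((kidsOf nc j).map (Fv nc DP)).sum := by
  have hn1 : termN nc DP (nc.length + 1) j = true :=
    termN_mono (termN_to_n hk) (by omega)
  have hkid := termN_kids hj hd hn1
  unfold Fv
  conv_lhs => rw [show nc.length + 1 = nc.length + 1 from rfl]
  rw [show fS nc DP (nc.length + 1) j =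
    if DP.getD j 0 ≠ -1 then DP.getD j 0
    else 1 + ((kidsOf nc j).map (fun c => fS nc DP nc.length c)).sum from rfl]
  rw [if_neg (not_not_intro hd)]
  congr 1
  refine congrArg List.sum (List.map_congr_left ?_)
  intro c hc
  exact fS_stable (hkid c hc) le_rfl (by omega)

-- generic getD/set facts (value lists and option lists)
lemma getD_set_eq {α : Type} (xs : List α) (i : Nat) (v d : α) (h : i < xs.length) :
    (xs.set i v).getD i d = v := by
  simp [List.getD, h]

lemma getD_set_ne {α : Type} (xs : List α) {i m : Nat} (v d : α) (h : m ≠ i) :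
    (xs.set i v).getD m d = xs.getD m d := by
  simp [List.getD, (Ne.symm h : i ≠ m)]

-- Python-index wrap: a valid (possibly negative) index reads element j
lemma pyGet_of_wrap {α : Type} {xs : List α} {j : Nat} {jI : Int} (d : α) (hj : j < xs.length)
    (h : jI = (j : Int) ∨ jI = (j : Int) - (xs.length : Int)) :
    PySem.List.pyGet? xs jI = some (xs.getD j d) := by
  rcases h with rfl | rfl
  · rw [PySem.List.pyGet?_natCast, List.getD_eq_getElem _ _ hj, List.getElem?_eq_getElem hj]
  · have hk : (j : Int) - (xs.length : Int) = -((xs.length - j : Nat) : Int) := by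
      push_cast [Nat.cast_sub (le_of_lt hj)]; ring
    rw [hk, PySem.List.pyGet?_neg_natCast xs (xs.length - j) (by omega) (by omega)]
    rw [show xs.length - (xs.length - j) = j by omega]
    rw [List.getD_eq_getElem _ _ hj, List.getElem?_eq_getElem hj]

-- A-side: invariant on the threaded DP list
def InvA (nc DP0 DP' : List Int) : Prop :=
  DP'.length = DP0.length ∧
  ∀ j : Nat, j < nc.length →
    DP'.getD j 0 = DP0.getD j 0 ∨ (DP0.getD j 0 = -1 ∧ DP'.getD j 0 = Fv nc DP0 j)

lemma InvA_set {nc DP0 : List Int} (Hlen : nc.length ≤ DP0.length)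
    {DP' : List Int} (hInv : InvA nc DP0 DP') {i : Nat} (hi : i < nc.length) :
    InvA nc DP0 (DP'.set i (Fv nc DP0 i)) := by
  obtain ⟨hL, hAll⟩ := hInv
  refine ⟨by simp [hL], ?_⟩
  intro m hm
  by_cases hmi : m = i
  · subst hmi
    by_cases hd : DP0.getD m 0 = -1
    · exact Or.inr ⟨hd, getD_set_eq _ _ _ _ (by omega)⟩
    · refine Or.inl ?_
      rw [getD_set_eq _ _ _ _ (by omega), Fv_memo hd]
  · rw [getD_set_ne _ _ _ hmi]
    exact hAll m hm

lemma scoreAuxA_correct {nc DP0 : List Int} (Hlen : nc.length ≤ DP0.length) :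
    ∀ fuel (j : Nat) (jI : Int) DP', j < nc.length → fuel ≤ nc.length + 1 →
      termN nc DP0 fuel j = true → InvA nc DP0 DP' →
      (jI = (j : Int) ∨ (DP0.length = nc.length ∧ jI = (j : Int) - (nc.length : Int))) →
      (scoreAuxA fuel jI nc DP').1 = Fv nc DP0 j ∧
      (0 ≤ jI → InvA nc DP0 (scoreAuxA fuel jI nc DP').2) := by
  intro fuel
  induction fuel with
  | zero =>
    intro j jI DP' hj hfu ht hInv hJ
    rw [termN_zero] at ht
    exact absurd ht (by simp)
  | succ fuel ih =>
    intro j jI DP' hj hfu ht hInv hJ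
    have hn : 0 < nc.length := by omega
    have hL : DP'.length = DP0.length := hInv.1
    have hAll := hInv.2
    have hJn : jI = (j : Int) ∨ jI = (j : Int) - (nc.length : Int) := by
      rcases hJ with h | ⟨_, h⟩
      · exact Or.inl h
      · exact Or.inr h
    have hJ' : jI = (j : Int) ∨ jI = (j : Int) - (DP'.length : Int) := by
      rcases hJ with h | ⟨he, h⟩
      · exact Or.inl h
      · right; rw [hL, he]; exact h
    have hgetD : PySem.List.pyGet? DP' jI = some (DP'.getD j 0) :=
      pyGet_of_wrap 0 (by omega) hJ'
    have hgetn : PySem.List.pyGet? nc jI = some (nc.getD j 0) := pyGet_of_wrap 0 hj hJn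
    simp only [scoreAuxA, hgetD, hgetn]
    by_cases hd : DP'.getD j 0 = -1
    · -- unmemoized in the threaded DP
      rw [if_neg (fun h => h hd)]
      have hdp0 : DP0.getD j 0 = -1 := by
        rcases hAll j hj with h | h
        · rw [← h]; exact hd
        · exact h.1
      have hkid : ∀ c ∈ kidsOf nc j, termN nc DP0 fuel c = true := termN_kids hj hdp0 ht
      set k := nc.getD j 0 with hkdef
      by_cases hk0 : k = 0
      · rw [if_pos hk0]
        refine ⟨?_, fun _ => hInv⟩
        rw [Fv_unfold hj hdp0 ht]
        have h0 : kidsOf nc j = [] := by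
          unfold kidsOf
          rw [← hkdef, hk0]
          rfl
        rw [h0]
        rfl
      · rw [if_neg hk0]
        have hcongr : ∀ t : Nat, PySem.Int.mod (jI + 1 + (t : Int)) ((nc.length : Int)) =
            (((j + 1 + t) % nc.length : Nat) : Int) := by
          intro t
          rw [PySem.Int.mod_eq_emod_of_pos (by exact_mod_cast hn)]
          have hsplit : jI + 1 + (t : Int) = ((j + 1 + t : Nat) : Int) ∨
              jI + 1 + (t : Int) = ((j + 1 + t : Nat) : Int) - (nc.length : Int) := by
            rcases hJn with rfl | rfl
            · left; push_cast; ring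
            · right; push_cast; ring
          rcases hsplit with h | h
          · rw [h]; exact (Int.natCast_mod _ _).symm
          · rw [h, Int.sub_emod_right]; exact (Int.natCast_mod _ _).symm
        have key : ∀ m : Nat, m ≤ k.toNat →
            (let st := (PySem.List.pyRange (jI + 1) (jI + 1 + (m : Int)) 1).foldl
              (fun (st : Int × List Int) i =>
                let idx := PySem.Int.mod i ((nc.length : Int))
                let r := scoreAuxA fuel idx nc st.2
                (st.1 + r.1, PySem.List.pySetD r.2 idx r.1))
              (1, DP')
            st.1 = 1 + ((List.range m).map (fun t => Fv nc DP0 ((j + 1 + t) % nc.length))).sum ∧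
              InvA nc DP0 st.2) := by
          intro m
          induction m with
          | zero =>
            intro _
            rw [show jI + 1 + ((0 : Nat) : Int) = jI + 1 by push_cast; ring,
              PySem.List.pyRange_one_eq_nil (by omega)]
            simpa using hInv
          | succ m ihm =>
            intro hm
            obtain ⟨hst1, hstInv⟩ := ihm (by omega)
            rw [show jI + 1 + ((m + 1 : Nat) : Int) = (jI + 1 + (m : Int)) + 1 by push_cast; ring,
              PySem.List.pyRange_one_succ_right (by omega), List.foldl_append]
            simp only [List.foldl_cons, List.foldl_nil]
            rw [show (jI + 1 + (m : Int)) = jI + 1 + ((m : Nat) : Int) by push_cast; ring,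
              hcongr m]
            have hclt : (j + 1 + m) % nc.length < nc.length := Nat.mod_lt _ hn
            have hcmem : (j + 1 + m) % nc.length ∈ kidsOf nc j := by
              simp only [kidsOf, List.mem_map, List.mem_range]
              exact ⟨m, by omega, rfl⟩
            obtain ⟨hr1, hrInv⟩ := ih ((j + 1 + m) % nc.length)
              (((j + 1 + m) % nc.length : Nat) : Int) _ hclt (by omega)
              (hkid _ hcmem) hstInv (Or.inl rfl)
            refine ⟨?_, ?_⟩
            · simp only [List.range_succ, List.map_append, List.sum_append,
                List.map_cons, List.map_nil, List.sum_cons, List.sum_nil]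
              rw [hst1, hr1]
              ring
            · rw [hr1, PySem.List.pySetD_natCast]
              exact InvA_set Hlen (hrInv (by positivity)) hclt
        by_cases hkpos : 0 < k
        · rw [show k + jI + 1 = jI + 1 + ((k.toNat : Nat) : Int) by
            rw [Int.toNat_of_nonneg (by omega)]; ring]
          obtain ⟨hst1, hstInv⟩ := key k.toNat le_rfl
          have hFv : Fv nc DP0 j =
              1 + ((List.range k.toNat).map (fun t => Fv nc DP0 ((j + 1 + t) % nc.length))).sum := by
            rw [Fv_unfold hj hdp0 ht]
            unfold kidsOf
            rw [List.map_map, ← hkdef]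
            rfl
          refine ⟨by rw [hst1, ← hFv], ?_⟩
          intro hpos
          have hje : jI = (j : Int) := by
            rcases hJn with h | h
            · exact h
            · omega
          rw [hje] at hst1 hstInv
          rw [hje, PySem.List.pySetD_natCast, hst1, ← hFv]
          exact InvA_set Hlen hstInv hj
        · -- negative win count: empty range, total stays 1
          rw [PySem.List.pyRange_one_eq_nil (by omega)]
          simp only [List.foldl_nil]
          have hFv : Fv nc DP0 j = 1 := by
            rw [Fv_unfold hj hdp0 ht]
            have : kidsOf nc j = [] := by
              unfold kidsOf
              rw [← hkdef, Int.toNat_eq_zero.mpr (by omega)]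
              rfl
            rw [this]
            rfl
          refine ⟨hFv.symm, ?_⟩
          intro hpos
          have hje : jI = (j : Int) := by
            rcases hJn with h | h
            · exact h
            · omega
          rw [hje, PySem.List.pySetD_natCast, ← hFv]
          exact InvA_set Hlen hInv hj
    · -- memo hit in the threaded DP
      rw [if_pos hd]
      refine ⟨?_, fun _ => hInv⟩
      show DP'.getD j 0 = Fv nc DP0 j
      rcases hAll j hj with h | h
      · rw [h] at hd ⊢
        exact (Fv_memo hd).symm
      · exact h.2

-- B-side invariants
def GoodV (nc DP : List Int) (v : List (Option Int)) : Prop :=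
  v.length = nc.length ∧
  (∀ j, j < nc.length → DP.getD j 0 ≠ -1 → v.getD j none = some (DP.getD j 0)) ∧
  (∀ j x, j < nc.length → v.getD j none = some x →
    termN nc DP nc.length j = true ∧ x = Fv nc DP j)

def CompV (nc DP : List Int) (r : Nat) (v : List (Option Int)) : Prop :=
  ∀ j, j < nc.length → termN nc DP r j = true → (v.getD j none).isSome = true

lemma allKnown_iff (v : List (Option Int)) (n j : Nat) : ∀ rem t,
    (allKnown v n j t rem = true ↔
      ∀ u, u < rem → (v.getD ((j + 1 + (t + u)) % n) none).isSome = true) := by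
  intro rem
  induction rem with
  | zero => intro t; simp [allKnown]
  | succ rem ih =>
    intro t
    unfold allKnown
    split_ifs with h
    · rw [ih (t+1)]
      constructor
      · intro hall u hu
        cases u with
        | zero => simpa using h
        | succ u => have := hall u (by omega); rwa [show t + 1 + u = t + (u+1) by omega] at this
      · intro hall u hu
        have := hall (u+1) (by omega)
        rwa [show t + (u+1) = t + 1 + u by omega] at this
    · simp only [false_iff]
      intro hall
      exact h (by simpa using hall 0 (by omega))

-- facts about one step of the sweep
lemma bodyB_ext (nc : List Int) (st : List (Option Int) × Bool) (j : Nat) {i : Nat} {x : Int}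
    (h : st.1.getD i none = some x) : (bodyB nc st j).1.getD i none = some x := by
  unfold bodyB
  cases hj : st.1.getD j none with
  | some y => exact h
  | none =>
    simp only
    split_ifs with hall
    · by_cases hij : i = j
      · subst hij
        rw [h] at hj
        exact absurd hj (by simp)
      · rw [getD_set_ne _ _ _ hij]
        exact h
    · exact h

lemma bodyB_flag (nc : List Int) (st : List (Option Int) × Bool) (j : Nat)
    (h : st.2 = true) : (bodyB nc st j).2 = true := by
  unfold bodyB
  cases hj : st.1.getD j none with
  | some y => exact h
  | none =>
    simp only
    split_ifs with hall
    · rfl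
    · exact h

lemma bodyB_of_flag_false (nc : List Int) (st : List (Option Int) × Bool) (j : Nat)
    (h : (bodyB nc st j).2 = false) : bodyB nc st j = st := by
  unfold bodyB at h ⊢
  cases hj : st.1.getD j none with
  | some y => rfl
  | none =>
    rw [hj] at h
    simp only at h ⊢
    split_ifs with hall
    · rw [if_pos hall] at h
      exact absurd h (by simp)
    · rfl

lemma bodyB_good {nc DP : List Int} {st : List (Option Int) × Bool} {j : Nat}
    (hG : GoodV nc DP st.1) (hj : j < nc.length) : GoodV nc DP (bodyB nc st j).1 := by
  obtain ⟨hlen, hmemo, hsound⟩ := hG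
  have hn : 0 < nc.length := by omega
  unfold bodyB
  cases hjv : st.1.getD j none with
  | some y => exact ⟨hlen, hmemo, hsound⟩
  | none =>
    simp only
    split_ifs with hall
    · -- the card gets valued: every won card is already valued at its true score
      have hd : DP.getD j 0 = -1 := by
        by_contra hd
        rw [hmemo j hj hd] at hjv
        exact absurd hjv (by simp)
      set k := (PySem.List.pyGetD nc (j : Int) 0).toNat with hkdef
      have hkk : k = (nc.getD j 0).toNat := by rw [hkdef, PySem.List.pyGetD_natCast]
      have hkn : ∀ u, u < k → (st.1.getD ((j + 1 + u) % nc.length) none).isSome = true := by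
        intro u hu
        have := (allKnown_iff st.1 nc.length j k 0).1 hall u hu
        simpa using this
      have hkv : ∀ u, u < k → st.1.getD ((j + 1 + u) % nc.length) none =
          some (Fv nc DP ((j + 1 + u) % nc.length)) ∧
          termN nc DP nc.length ((j + 1 + u) % nc.length) = true := by
        intro u hu
        obtain ⟨x, hx⟩ := Option.isSome_iff_exists.1 (hkn u hu)
        obtain ⟨ht, hxv⟩ := hsound _ x (Nat.mod_lt _ hn) hx
        exact ⟨by rw [hx, hxv], ht⟩
      have htj : termN nc DP nc.length j = true := by
        apply termN_to_n
        apply termN_of_kids hj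
        intro c hc
        simp only [kidsOf, List.mem_map, List.mem_range] at hc
        obtain ⟨t, ht, rfl⟩ := hc
        exact (hkv t (by omega)).2
      have hval : 1 + ((List.range k).map
          (fun t => (st.1.getD ((j + 1 + t) % nc.length) none).getD 0)).sum = Fv nc DP j := by
        rw [Fv_unfold hj hd htj]
        congr 1
        rw [show (kidsOf nc j).map (Fv nc DP) =
          (List.range (nc.getD j 0).toNat).map (fun t => Fv nc DP ((j + 1 + t) % nc.length)) by
            unfold kidsOf; rw [List.map_map]; rfl]
        rw [← hkk]
        refine congrArg List.sum (List.map_congr_left ?_)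
        intro t ht
        rw [List.mem_range] at ht
        rw [(hkv t ht).1]
        rfl
      refine ⟨by rw [List.length_set]; exact hlen, ?_, ?_⟩
      · intro i hi hdi
        by_cases hij : i = j
        · subst hij; exact absurd hd hdi
        · rw [getD_set_ne _ _ _ hij]
          exact hmemo i hi hdi
      · intro i x hi hx
        by_cases hij : i = j
        · subst hij
          rw [getD_set_eq _ _ _ _ (by omega)] at hx
          cases hx
          exact ⟨htj, hval⟩
        · rw [getD_set_ne _ _ _ hij] at hx
          exact hsound i x hi hx
    · exact ⟨hlen, hmemo, hsound⟩

-- facts about a fold of bodyB over a list of card indices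
lemma foldB_ext (nc : List Int) (js : List Nat) : ∀ (st : List (Option Int) × Bool) {i : Nat}
    {x : Int}, st.1.getD i none = some x → ((js.foldl (bodyB nc) st).1.getD i none = some x) := by
  induction js with
  | nil => intro st i x h; exact h
  | cons j rest ih => intro st i x h; exact ih _ (bodyB_ext nc st j h)

lemma foldB_flag (nc : List Int) (js : List Nat) : ∀ (st : List (Option Int) × Bool),
    st.2 = true → (js.foldl (bodyB nc) st).2 = true := by
  induction js with
  | nil => intro st h; exact h
  | cons j rest ih => intro st h; exact ih _ (bodyB_flag nc st j h)

lemma foldB_id_of_flag_false (nc : List Int) (js : List Nat) :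
    ∀ (st : List (Option Int) × Bool), (js.foldl (bodyB nc) st).2 = false →
      js.foldl (bodyB nc) st = st := by
  induction js with
  | nil => intro st _; rfl
  | cons j rest ih =>
    intro st h
    simp only [List.foldl_cons] at h ⊢
    have hf : (bodyB nc st j).2 = false := by
      cases hb : (bodyB nc st j).2 with
      | false => rfl
      | true => rw [foldB_flag nc rest _ hb] at h; exact absurd h (by simp)
    rw [bodyB_of_flag_false nc st j hf] at h ⊢
    exact ih st h

lemma foldB_good {nc DP : List Int} (js : List Nat) (hjs : ∀ j ∈ js, j < nc.length) :
    ∀ (st : List (Option Int) × Bool), GoodV nc DP st.1 →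
      GoodV nc DP ((js.foldl (bodyB nc) st).1) := by
  induction js with
  | nil => intro st h; exact h
  | cons j rest ih =>
    intro st h
    exact ih (fun a ha => hjs a (by simp [ha])) _ (bodyB_good h (hjs j (by simp)))

lemma foldB_comp_at {nc DP : List Int} {js : List Nat} {j : Nat} (hjmem : j ∈ js)
    (hjs : ∀ a ∈ js, a < nc.length) {st : List (Option Int) × Bool} (hG : GoodV nc DP st.1)
    (hkids : ∀ c ∈ kidsOf nc j, (st.1.getD c none).isSome = true) :
    (((js.foldl (bodyB nc) st).1.getD j none).isSome = true) := by
  have hj : j < nc.length := hjs j hjmem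
  have hn : 0 < nc.length := by omega
  obtain ⟨l1, l2, rfl⟩ := List.append_of_mem hjmem
  rw [List.foldl_append, List.foldl_cons]
  set stm := l1.foldl (bodyB nc) st with hstm
  have hGm : GoodV nc DP stm.1 :=
    foldB_good l1 (fun a ha => hjs a (by simp [ha])) st hG
  have hkidsm : ∀ c ∈ kidsOf nc j, (stm.1.getD c none).isSome = true := by
    intro c hc
    obtain ⟨x, hx⟩ := Option.isSome_iff_exists.1 (hkids c hc)
    rw [foldB_ext nc l1 st hx]
    rfl
  have hset : ((bodyB nc stm j).1.getD j none).isSome = true := by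
    unfold bodyB
    cases hjv : stm.1.getD j none with
    | some y =>
      show (stm.1.getD j none).isSome = true
      rw [hjv]
      rfl
    | none =>
      simp only
      have hall : allKnown stm.1 nc.length j 0 ((PySem.List.pyGetD nc (j : Int) 0).toNat) = true := by
        rw [allKnown_iff]
        intro u hu
        apply hkidsm
        simp only [kidsOf, List.mem_map, List.mem_range]
        refine ⟨u, ?_, by rw [Nat.zero_add]⟩
        rw [PySem.List.pyGetD_natCast] at hu
        exact hu
      rw [if_pos hall]
      rw [getD_set_eq _ _ _ _ (by rw [hGm.1]; omega)]
      rfl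
  obtain ⟨x, hx⟩ := Option.isSome_iff_exists.1 hset
  rw [foldB_ext nc l2 _ hx]
  rfl

lemma passB_correct {nc DP : List Int} {r : Nat} {v : List (Option Int)}
    (hG : GoodV nc DP v) (hC : CompV nc DP r v) :
    GoodV nc DP (passB nc v).1 ∧ CompV nc DP (r+1) (passB nc v).1 ∧
      ((passB nc v).2 = false → (passB nc v).1 = v) := by
  have hjs : ∀ a ∈ (List.range nc.length).reverse, a < nc.length := by
    intro a ha
    rw [List.mem_reverse, List.mem_range] at ha
    exact ha
  unfold passB
  refine ⟨foldB_good _ hjs _ hG, ?_, ?_⟩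
  · intro j hj ht
    by_cases hd : DP.getD j 0 ≠ -1
    · have hsome : (v.getD j none).isSome = true := by rw [hG.2.1 j hj hd]; rfl
      obtain ⟨x, hx⟩ := Option.isSome_iff_exists.1 hsome
      rw [foldB_ext nc _ ((v, false) : List (Option Int) × Bool) (hx :
        ((v, false) : List (Option Int) × Bool).1.getD j none = some x)]
      rfl
    · rw [not_not] at hd
      apply foldB_comp_at (by rw [List.mem_reverse, List.mem_range]; exact hj) hjs hG
      intro c hc
      exact hC c (kid_lt (by omega) c hc) (termN_kids hj hd ht c hc)
  · intro h
    rw [foldB_id_of_flag_false nc _ _ h]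

lemma CompV_of_ge {nc DP : List Int} {r r' : Nat} {v : List (Option Int)}
    (h : CompV nc DP r v) (hr : r' ≤ r) : CompV nc DP r' v :=
  fun j hj ht => h j hj (termN_mono ht hr)

-- a sweep that changed nothing is a fixpoint: the table is complete at every depth
lemma CompV_fix {nc DP : List Int} {r : Nat} {v : List (Option Int)}
    (hG : GoodV nc DP v) (hC : CompV nc DP r v) (hfix : (passB nc v).1 = v) :
    ∀ m, CompV nc DP (r + m) v := by
  intro m
  induction m with
  | zero => exact hC
  | succ m ih =>
    have h := (passB_correct hG ih).2.1
    rw [hfix] at h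
    exact fun j hj ht => h j hj (termN_mono ht (by omega))

lemma roundsB_correct {nc DP : List Int} : ∀ (rem r : Nat) (v : List (Option Int)),
    GoodV nc DP v → CompV nc DP r v → nc.length ≤ r + rem →
    GoodV nc DP (roundsB nc v rem) ∧ CompV nc DP nc.length (roundsB nc v rem) := by
  intro rem
  induction rem with
  | zero =>
    intro r v hG hC hle
    exact ⟨hG, CompV_of_ge hC (by omega)⟩
  | succ rem ih =>
    intro r v hG hC hle
    obtain ⟨hG', hC', hfix⟩ := passB_correct (r := r) hG hC
    have hunf : roundsB nc v (rem+1) =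
        if (passB nc v).2 then roundsB nc (passB nc v).1 rem else (passB nc v).1 := rfl
    cases hp : (passB nc v).2 with
    | true =>
      rw [hunf, hp, if_pos rfl]
      exact ih (r+1) _ hG' hC' (by omega)
    | false =>
      rw [hunf, hp, if_neg (by simp)]
      have hfx := hfix hp
      rw [hfx]
      rw [hfx] at hC'
      refine ⟨hG, ?_⟩
      have := CompV_fix hG hC' (by rw [hfx]) (nc.length)
      exact CompV_of_ge this (by omega)

-- evaluating B's port at a terminating card j (s a possibly negative index reading j)
lemma alt_eval {nc DP : List Int} {s : Int} {j : Nat} (hj : j < nc.length)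
    (hlen : nc.length ≤ DP.length)
    (hJ : s = (j : Int) ∨ (DP.length = nc.length ∧ s = (j : Int) - (nc.length : Int)))
    (ht : termN nc DP nc.length j = true) :
    score_one_card_alt s nc DP = Fv nc DP j := by
  have hJD : s = (j : Int) ∨ s = (j : Int) - (DP.length : Int) := by
    rcases hJ with h | ⟨he, h⟩
    · exact Or.inl h
    · right; rw [he]; exact h
  have hgetD : PySem.List.pyGet? DP s = some (DP.getD j 0) := pyGet_of_wrap 0 (by omega) hJD
  unfold score_one_card_alt
  simp only [hgetD]
  by_cases hd : DP.getD j 0 = -1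
  · rw [if_neg (fun h => h hd)]
    show (match PySem.List.pyGet? (roundsB nc ((List.range nc.length).map (fun (j : Nat) =>
        let dj := PySem.List.pyGetD DP (j : Int) 0
        if dj ≠ -1 then some dj else none)) nc.length) s with
      | some (some v) => v
      | _ => 0) = Fv nc DP j
    set V0 : List (Option Int) := (List.range nc.length).map (fun (j : Nat) =>
        let dj := PySem.List.pyGetD DP (j : Int) 0
        if dj ≠ -1 then some dj else none) with hV0
    have hG0 : GoodV nc DP V0 := by
      refine ⟨by simp [hV0], ?_, ?_⟩
      · intro i hi hdi
        rw [hV0, PySem.List.getD_map_range _ _ _ _ hi]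
        simp only [PySem.List.pyGetD_natCast]
        rw [if_pos hdi]
      · intro i x hi hx
        rw [hV0, PySem.List.getD_map_range _ _ _ _ hi] at hx
        simp only [PySem.List.pyGetD_natCast] at hx
        by_cases hdi : DP.getD i 0 ≠ -1
        · rw [if_pos hdi] at hx
          cases hx
          have ht1 : termN nc DP 1 i = true := by
            rw [termN_succ nc DP 0 hi, if_pos hdi]
          exact ⟨termN_mono ht1 (by omega), (Fv_memo hdi).symm⟩
        · rw [if_neg hdi] at hx
          exact absurd hx (by simp)
    have hC0 : CompV nc DP 0 V0 := by
      intro i hi hti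
      rw [termN_zero] at hti
      exact absurd hti (by simp)
    obtain ⟨hGF, hCF⟩ := roundsB_correct nc.length 0 V0 hG0 hC0 (by omega)
    obtain ⟨x, hx⟩ := Option.isSome_iff_exists.1 (hCF j hj ht)
    obtain ⟨-, hxv⟩ := hGF.2.2 j x hj hx
    have hgetF : PySem.List.pyGet? (roundsB nc V0 nc.length) s =
        some ((roundsB nc V0 nc.length).getD j none) := by
      apply pyGet_of_wrap none (by rw [hGF.1]; omega)
      rcases hJD with h | h
      · exact Or.inl h
      · right
        rw [hGF.1]
        rcases hJ with h' | ⟨he, h'⟩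
        · omega
        · rw [← he]; exact h
    rw [hgetF, hx]
    exact hxv
  · rw [if_pos hd]
    exact (Fv_memo hd).symm

-- ===== VERDICT (by name: the statement is the Claim_ definition above) =====
theorem score_one_card_spec : Claim_equal_score_one_card := by
  intro s nc DP _ hpre
  unfold Spec_score_one_card
  rcases hpre with ⟨hnn, hne⟩ | hrest
  · -- memo hit: both programs return DP[number_to_score] immediately
    obtain ⟨d, hd⟩ : ∃ d, PySem.List.pyGet? DP s = some d := by
      cases h : PySem.List.pyGet? DP s
      · exact absurd h hnn
      · exact ⟨_, rfl⟩
    have hdne : d ≠ -1 := fun hc => hne (hc ▸ hd)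
    unfold score_one_card score_one_card_alt
    simp only [scoreAuxA, hd]
    rw [if_pos hdne, if_pos hdne]
  · -- scored card: A's recursion and B's sweep both compute Fv
    obtain ⟨j, hjlt, hlen, ht, hJ⟩ : ∃ j : Nat, j < nc.length ∧ nc.length ≤ DP.length ∧
        termN nc DP nc.length j = true ∧
        (s = (j : Int) ∨ (DP.length = nc.length ∧ s = (j : Int) - (nc.length : Int))) := by
      rcases hrest with ⟨h0, hlt, hle, ht⟩ | ⟨hneg, hge, heq, ht⟩
      · exact ⟨s.toNat, by omega, hle, ht, Or.inl (by omega)⟩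
      · exact ⟨(s + nc.length).toNat, by omega, by omega, ht, Or.inr ⟨heq, by omega⟩⟩
    have hA := (scoreAuxA_correct hlen (nc.length + 1) j s DP hjlt le_rfl
      (termN_mono ht (by omega)) ⟨rfl, fun m _ => Or.inl rfl⟩ hJ).1
    unfold score_one_card
    rw [hA, alt_eval hjlt hlen hJ ht]
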